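-- pv_equiv track=rewrite | github.com/corestacklabs/FinOps | saas_to_FOCUS_transformation/saas_to_focus_formatter/mapper_generator/generate_mapper.py | _score_column
-- ===== SOURCE A (Python) =====
-- from typing import Any, Dict, List, Optional, Tuple
--
-- def _score_column(source_col: str, patterns: List[Tuple[str, int, str]]) -> Tuple[int, str]:
--     """
--     Score a source column name against a list of (pattern, score, transform) tuples.
--
--     Returns (best_score, transform_name).  Returns (0, "identity") if no match.
--     """
--     col_lc = source_col.lower().replace("-", "_")
--     best_score = 0
--     best_transform = "identity"
--     for pattern, score, transform in patterns:
--         if pattern in col_lc: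
--             if score > best_score:
--                 best_score = score
--                 best_transform = transform
--     return best_score, best_transform
-- ===== SOURCE B (Python) =====
-- def _score_column(source_col, patterns):
--     """Priority order: scan patterns sorted by score descending (stable), return the
--     first positive-score substring match; fall through to (0, "identity")."""
--     col_lc = source_col.lower().replace("-", "_")
--     for pattern, score, transform in sorted(patterns, key=lambda p: p[1], reverse=True):
--         if score <= 0:
--             break
--         if pattern in col_lc:
--             return score, transform
--     return 0, "identity"
-- ===== Notes on version B (the rewrite author's own statement) =====
-- stated objective: alternative
-- what changed: A's single scan with a running best-score tracker is replaced by a stable sort of the patterns by score descending followed by a short-circuiting scan that returns the first positive-score substring match (break once scores drop to <= 0); stability reproduces A's first-max tie-breaking.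
import Mathlib
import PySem

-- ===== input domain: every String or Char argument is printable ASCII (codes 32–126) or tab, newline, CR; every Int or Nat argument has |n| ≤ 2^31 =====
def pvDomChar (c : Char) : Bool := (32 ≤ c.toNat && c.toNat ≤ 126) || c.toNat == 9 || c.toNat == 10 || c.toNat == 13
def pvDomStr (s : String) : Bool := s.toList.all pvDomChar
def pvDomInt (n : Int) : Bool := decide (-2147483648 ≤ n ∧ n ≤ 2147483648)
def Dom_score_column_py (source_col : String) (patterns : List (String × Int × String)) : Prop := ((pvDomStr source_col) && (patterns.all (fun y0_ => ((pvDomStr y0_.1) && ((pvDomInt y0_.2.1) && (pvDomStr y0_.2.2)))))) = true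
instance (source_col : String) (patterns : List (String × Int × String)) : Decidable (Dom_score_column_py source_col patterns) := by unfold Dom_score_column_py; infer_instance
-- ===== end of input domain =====

-- B replaces A's scan-all-with-running-best by a stable sort of the patterns by score
-- descending followed by a short-circuiting scan returning the first positive-score match
-- (alternative decomposition, same cost class).

-- ===== PORT A =====
-- one step of A's loop: on a matching pattern with a strictly greater score, update the best
def scoreStepA (col_lc : String) (st : Int × String) (pst : String × Int × String) : Int × String :=
  if PySem.Str.isIn pst.1 col_lc then
    (if pst.2.1 > st.1 then (pst.2.1, pst.2.2) else st)
  else st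

def score_column_py (source_col : String) (patterns : List (String × Int × String)) : Int × String :=
  let col_lc := PySem.Str.replace (PySem.Str.lower source_col) "-" "_"
  patterns.foldl (scoreStepA col_lc) (0, "identity")

-- ===== PORT B =====
-- Source B's for-loop over the sorted list: break on score ≤ 0, return on the first match
def scanB (col_lc : String) : List (String × Int × String) → Int × String
  | [] => (0, "identity")
  | p :: rest =>
    if p.2.1 ≤ 0 then (0, "identity")
    else if PySem.Str.isIn p.1 col_lc then (p.2.1, p.2.2)
    else scanB col_lc rest

def score_column_py_alt (source_col : String) (patterns : List (String × Int × String)) : Int × String :=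
  let col_lc := PySem.Str.replace (PySem.Str.lower source_col) "-" "_"
  scanB col_lc (PySem.List.sorted patterns (fun p => p.2.1) true)

-- ===== PRECONDITION & SPEC =====
def Spec_score_column_py (source_col : String) (patterns : List (String × Int × String)) (out : Int × String) : Prop := out = score_column_py_alt source_col patterns
instance (source_col : String) (patterns : List (String × Int × String)) (out : Int × String) : Decidable (Spec_score_column_py source_col patterns out) := by unfold Spec_score_column_py; infer_instance

-- ===== CLAIM (what is proved, stated in full; the proofs are below) =====
def Claim_equal_score_column_py : Prop := ∀ (source_col : String) (patterns : List (String × Int × String)), Dom_score_column_py source_col patterns → Spec_score_column_py source_col patterns (score_column_py source_col patterns)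

-- ===== LEMMAS AND PROOFS =====

-- B's scan returns a score strictly below any strict upper bound S > 0 on the list's scores
lemma scanB_score_lt (c : String) (l : List (String × Int × String)) (S : Int)
    (hS : 0 < S) (hb : ∀ p ∈ l, p.2.1 < S) : (scanB c l).1 < S := by
  induction l with
  | nil => simpa [scanB] using hS
  | cons y ys ih =>
    have hy := hb y (by simp)
    by_cases h0 : y.2.1 ≤ 0
    · simpa [scanB, h0] using hS
    · by_cases hin : PySem.Chars.isIn y.1.toList c.toList = true
      · simpa [scanB, h0, hin] using hy
      · simpa [scanB, h0, hin] using ih (fun p hp => hb p (by simp [hp]))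

-- inserting x into a score-descending list acts on B's scan exactly like A's loop step
lemma scanB_insert (c : String) (l : List (String × Int × String))
    (x : String × Int × String)
    (hd : l.Pairwise (fun a b => b.2.1 ≤ a.2.1)) :
    scanB c (PySem.List.insertBy (fun a b => decide (b.2.1 < a.2.1)) x l)
      = scoreStepA c (scanB c l) x := by
  induction l with
  | nil =>
    by_cases h0 : x.2.1 ≤ 0 <;> by_cases hin : PySem.Chars.isIn x.1.toList c.toList = true <;>
      simp_all [PySem.List.insertBy, scanB, scoreStepA]
  | cons y ys ih =>
    rcases List.pairwise_cons.mp hd with ⟨hy, hys⟩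
    by_cases hlt : y.2.1 < x.2.1
    · -- x goes in front of y
      have hins : PySem.List.insertBy (fun a b => decide (b.2.1 < a.2.1)) x (y :: ys)
          = x :: y :: ys := by simp [PySem.List.insertBy, hlt]
      rw [hins]
      by_cases h0 : x.2.1 ≤ 0
      · -- x.2.1 ≤ 0 and y.2.1 < x.2.1 ⇒ the whole tail is dead on both sides
        have hy0 : y.2.1 ≤ 0 := by omega
        have htail : scanB c (y :: ys) = (0, "identity") := by simp [scanB, hy0]
        rw [htail]
        have hng : ¬ ((0, "identity") : Int × String).1 < x.2.1 := by simp; omega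
        by_cases hin : PySem.Chars.isIn x.1.toList c.toList = true <;>
          simp [scanB, scoreStepA, h0, hin, hng]
      · by_cases hin : PySem.Chars.isIn x.1.toList c.toList = true
        · -- x matches; every score below is < x.2.1, so A's step also picks x
          have hblt : (scanB c (y :: ys)).1 < x.2.1 := by
            refine scanB_score_lt c (y :: ys) x.2.1 (by omega) ?_
            intro p hp
            rcases List.mem_cons.mp hp with h | h
            · rw [h]; exact hlt
            · have := hy p h; omega
          have hlhs : scanB c (x :: y :: ys) = (x.2.1, x.2.2) := by simp [scanB, h0, hin]
          rw [hlhs]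
          simp [scoreStepA, hin, hblt]
        · have hlhs : scanB c (x :: y :: ys) = scanB c (y :: ys) := by simp [scanB, h0, hin]
          rw [hlhs]
          simp [scoreStepA, hin]
    · -- x stays after y (key x ≤ key y): y is handled first on both sides
      have hle : x.2.1 ≤ y.2.1 := by omega
      by_cases hy0 : y.2.1 ≤ 0
      · -- break at y on both sides; x.2.1 ≤ 0 too, so A's step does nothing
        have hx0 : x.2.1 ≤ 0 := by omega
        by_cases hin : PySem.Chars.isIn x.1.toList c.toList = true <;>
          simp [PySem.List.insertBy, hlt, scanB, scoreStepA, hy0, hin] <;> omega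
      · by_cases hyin : PySem.Chars.isIn y.1.toList c.toList = true
        · -- return y on both sides; x.2.1 ≤ y.2.1, so A's step does nothing
          by_cases hin : PySem.Chars.isIn x.1.toList c.toList = true <;>
            simp [PySem.List.insertBy, hlt, scanB, scoreStepA, hy0, hyin, hin]
        · -- y skipped on both sides; recurse
          simp only [PySem.List.insertBy, hlt, decide_false, Bool.false_eq_true,
            if_false, scanB, hy0, if_false]
          simpa [scanB, hy0, hyin] using ih hys

-- A's fold over the original list equals B's scan over the score-descending sort
lemma fold_eq_scan_sorted (c : String) (patterns : List (String × Int × String)) :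
    patterns.foldl (scoreStepA c) (0, "identity")
      = scanB c (PySem.List.sorted patterns (fun p => p.2.1) true) := by
  induction patterns using List.reverseRecOn with
  | nil => rfl
  | append_singleton xs x ih =>
    rw [PySem.List.sorted_rev_eq_foldl_insertBy, List.foldl_append, List.foldl_append]
    simp only [List.foldl_cons, List.foldl_nil]
    rw [← PySem.List.sorted_rev_eq_foldl_insertBy,
      scanB_insert c _ x (PySem.List.sorted_pairwise_rev xs (fun p => p.2.1)), ← ih]

-- ===== VERDICT (by name: the statement is the Claim_ definition above) =====
theorem score_column_py_spec : Claim_equal_score_column_py := by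
  intro source_col patterns _
  simp only [Spec_score_column_py, score_column_py, score_column_py_alt]
  exact fold_eq_scan_sorted _ patterns
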